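-- pv_equiv track=rewrite | github.com/Coolo2/questbot | QuestClient/classes.py | getQuestXPLevel
-- ===== SOURCE A (Python) =====
-- def getQuestXPLevel(quest_xp : int):
--
--     level : int = 0
--     for i_up in range(1, 51):
--         i = 51-i_up
--         xp_required = 3000*(i) + 225*(i**2)
--         if quest_xp >= xp_required:
--             level = i
--             break
--
--     return level
-- ===== SOURCE B (Python) =====
-- def getQuestXPLevel(quest_xp: int):
--     # Binary search for the largest level i in [0, 50] with 3000*i + 225*i**2 <= quest_xp
--     # (level 0 means no threshold reached).
--     lo, hi = 0, 50
--     while lo < hi: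
--         mid = (lo + hi + 1) // 2
--         if 3000 * mid + 225 * mid * mid <= quest_xp:
--             lo = mid
--         else:
--             hi = mid - 1
--     return lo
-- ===== Notes on version B (the rewrite author's own statement) =====
-- stated objective: alternative
-- what changed: Replaces A's linear top-down scan over the 50 XP thresholds with a binary search for the largest level whose threshold is met.
import Mathlib
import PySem

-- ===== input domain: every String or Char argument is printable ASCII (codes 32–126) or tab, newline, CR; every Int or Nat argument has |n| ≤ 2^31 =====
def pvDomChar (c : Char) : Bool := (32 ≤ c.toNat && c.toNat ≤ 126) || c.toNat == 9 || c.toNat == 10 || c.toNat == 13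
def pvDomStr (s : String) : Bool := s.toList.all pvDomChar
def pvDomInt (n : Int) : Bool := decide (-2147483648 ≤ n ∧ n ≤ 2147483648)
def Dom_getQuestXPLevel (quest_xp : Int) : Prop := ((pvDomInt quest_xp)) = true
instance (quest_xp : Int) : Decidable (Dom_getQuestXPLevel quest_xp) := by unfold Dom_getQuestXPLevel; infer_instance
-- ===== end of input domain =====

-- B replaces A's linear top-down scan of the 50 XP thresholds with a binary search
-- for the largest level whose threshold is met (alternative algorithm, same result).

-- ===== PORT A =====
-- the for-loop with break: try i = 50, 49, …, 1 in order, return the first i whose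
-- threshold is met (level stays 0 if none is).
def getQuestXPLevelLoop (quest_xp : Int) : List Int → Int
  | [] => 0
  | i_up :: rest =>
    let i := 51 - i_up
    let xp_required := 3000 * i + 225 * i ^ 2
    if quest_xp ≥ xp_required then i else getQuestXPLevelLoop quest_xp rest

def getQuestXPLevel (quest_xp : Int) : Int :=
  getQuestXPLevelLoop quest_xp (PySem.List.pyRange 1 51 1)

-- ===== PORT B =====
-- binary search: invariant lo ≤ answer ≤ hi; terminates when lo = hi.
def getQuestXPLevelBS (quest_xp lo hi : Int) : Int :=
  if h : lo < hi then
    let mid := PySem.Int.floordiv (lo + hi + 1) 2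
    if 3000 * mid + 225 * mid * mid ≤ quest_xp then
      getQuestXPLevelBS quest_xp mid hi
    else
      getQuestXPLevelBS quest_xp lo (mid - 1)
  else lo
termination_by (hi - lo).toNat
decreasing_by
  · have hm : PySem.Int.floordiv (lo + hi + 1) 2 = (lo + hi + 1) / 2 :=
      PySem.Int.floordiv_eq_ediv_of_pos (by omega)
    omega
  · have hm : PySem.Int.floordiv (lo + hi + 1) 2 = (lo + hi + 1) / 2 :=
      PySem.Int.floordiv_eq_ediv_of_pos (by omega)
    omega

def getQuestXPLevel_alt (quest_xp : Int) : Int :=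
  getQuestXPLevelBS quest_xp 0 50

-- ===== PRECONDITION & SPEC =====
def Spec_getQuestXPLevel (quest_xp : Int) (out : Int) : Prop := out = getQuestXPLevel_alt quest_xp
instance (quest_xp : Int) (out : Int) : Decidable (Spec_getQuestXPLevel quest_xp out) := by unfold Spec_getQuestXPLevel; infer_instance

-- ===== CLAIM (what is proved, stated in full; the proofs are below) =====
def Claim_equal_getQuestXPLevel : Prop := ∀ (quest_xp : Int), Dom_getQuestXPLevel quest_xp → Spec_getQuestXPLevel quest_xp (getQuestXPLevel quest_xp)

-- ===== LEMMAS AND PROOFS =====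

-- the threshold for level i
def pvF (i : Int) : Int := 3000 * i + 225 * i ^ 2

-- characterisation of the answer: l is 0 and every level in [1,50] misses, or l is
-- the largest level in [1,50] whose threshold is met.
def pvR (x l : Int) : Prop :=
  (l = 0 ∧ ∀ i : Int, 1 ≤ i → i ≤ 50 → x < pvF i) ∨
  (1 ≤ l ∧ l ≤ 50 ∧ pvF l ≤ x ∧ ∀ i : Int, l < i → i ≤ 50 → x < pvF i)

theorem pvR_unique (x a b : Int) (ha : pvR x a) (hb : pvR x b) : a = b := by
  rcases ha with ⟨ha0, haAll⟩ | ⟨ha1, ha50, haLe, haAll⟩ <;>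
    rcases hb with ⟨hb0, hbAll⟩ | ⟨hb1, hb50, hbLe, hbAll⟩
  · omega
  · exact absurd hbLe (not_le.mpr (haAll b hb1 hb50))
  · exact absurd haLe (not_le.mpr (hbAll a ha1 ha50))
  · by_contra hne
    rcases lt_or_gt_of_ne hne with h | h
    · exact absurd hbLe (not_le.mpr (haAll b h hb50))
    · exact absurd haLe (not_le.mpr (hbAll a h ha50))

-- A's loop over the tail range [51-k, …, 50] of i_up values (i.e. levels k down to 1)
theorem pvLoopA_inv (x : Int) : ∀ k : Nat, k ≤ 50 →
    ((getQuestXPLevelLoop x (PySem.List.pyRange (51 - (k : Int)) 51 1) = 0 ∧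
        ∀ i : Int, 1 ≤ i → i ≤ (k : Int) → x < pvF i) ∨
      (1 ≤ getQuestXPLevelLoop x (PySem.List.pyRange (51 - (k : Int)) 51 1) ∧
        getQuestXPLevelLoop x (PySem.List.pyRange (51 - (k : Int)) 51 1) ≤ (k : Int) ∧
        pvF (getQuestXPLevelLoop x (PySem.List.pyRange (51 - (k : Int)) 51 1)) ≤ x ∧
        ∀ i : Int, getQuestXPLevelLoop x (PySem.List.pyRange (51 - (k : Int)) 51 1) < i →
          i ≤ (k : Int) → x < pvF i)) := by
  intro k
  induction k with
  | zero =>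
    intro _
    left
    constructor
    · simp [PySem.List.pyRange, getQuestXPLevelLoop]
    · intro i h1 h2; omega
  | succ n ih =>
    intro hk
    have hcons : PySem.List.pyRange (51 - ((n + 1 : Nat) : Int)) 51 1 =
        (51 - ((n + 1 : Nat) : Int)) :: PySem.List.pyRange (51 - ((n + 1 : Nat) : Int) + 1) 51 1 :=
      PySem.List.pyRange_one_cons (by push_cast; omega)
    have hnext : (51 - ((n + 1 : Nat) : Int) + 1) = 51 - ((n : Nat) : Int) := by push_cast; omega
    rw [hcons, hnext]
    simp only [getQuestXPLevelLoop]
    have hi : 51 - (51 - ((n + 1 : Nat) : Int)) = ((n : Int) + 1) := by push_cast; omega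
    rw [hi]
    by_cases hge : x ≥ 3000 * ((n : Int) + 1) + 225 * ((n : Int) + 1) ^ 2
    · rw [if_pos hge]
      right
      refine ⟨by omega, by push_cast; omega, by simpa [pvF] using hge, ?_⟩
      intro i h1 h2
      push_cast at h2
      omega
    · rw [if_neg hge]
      have hlt : x < pvF ((n : Int) + 1) := by simpa [pvF] using not_le.mp hge
      rcases ih (by omega) with ⟨h0, hall⟩ | ⟨h1, h2, h3, hall⟩
      · left
        refine ⟨h0, ?_⟩
        intro i hi1 hi2
        push_cast at hi2
        rcases eq_or_lt_of_le hi2 with he | hl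
        · rw [he]; exact hlt
        · exact hall i hi1 (by omega)
      · right
        refine ⟨h1, by push_cast; omega, h3, ?_⟩
        intro i hi1 hi2
        push_cast at hi2
        rcases eq_or_lt_of_le hi2 with he | hl
        · rw [he]; exact hlt
        · exact hall i hi1 (by omega)

theorem pvA_R (x : Int) : pvR x (getQuestXPLevel x) := by
  have h := pvLoopA_inv x 50 (by omega)
  norm_num at h
  unfold pvR getQuestXPLevel
  exact h

-- terminal state of the binary search: lo = hi carries the full characterisation
theorem pvBS_base (x lo : Int) (h0 : 0 ≤ lo) (h50 : lo ≤ 50)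
    (hlo : lo = 0 ∨ pvF lo ≤ x) (hhi : ∀ i : Int, lo < i → i ≤ 50 → x < pvF i) :
    pvR x lo := by
  rcases eq_or_lt_of_le h0 with h | h
  · left
    exact ⟨h.symm, fun i h1 h2 => hhi i (by omega) h2⟩
  · right
    refine ⟨by omega, h50, ?_, fun i h1 h2 => hhi i h1 h2⟩
    rcases hlo with h' | h'
    · omega
    · exact h'

theorem pvBS_inv (x : Int) : ∀ n : Nat, ∀ lo hi : Int, (hi - lo).toNat ≤ n →
    0 ≤ lo → lo ≤ hi → hi ≤ 50 → (lo = 0 ∨ pvF lo ≤ x) →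
    (∀ i : Int, hi < i → i ≤ 50 → x < pvF i) →
    pvR x (getQuestXPLevelBS x lo hi) := by
  intro n
  induction n with
  | zero =>
    intro lo hi hfuel h0 hlh h50 hlo hhi
    rw [getQuestXPLevelBS, dif_neg (by omega)]
    exact pvBS_base x lo h0 (by omega) hlo (fun i h1 h2 => hhi i (by omega) h2)
  | succ n ih =>
    intro lo hi hfuel h0 hlh h50 hlo hhi
    rw [getQuestXPLevelBS]
    by_cases hlt : lo < hi
    · rw [dif_pos hlt]
      have hm : PySem.Int.floordiv (lo + hi + 1) 2 = (lo + hi + 1) / 2 :=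
        PySem.Int.floordiv_eq_ediv_of_pos (by omega)
      simp only [hm]
      set m := (lo + hi + 1) / 2 with hmdef
      have hmlo : lo < m := by omega
      have hmhi : m ≤ hi := by omega
      by_cases hc : 3000 * m + 225 * m * m ≤ x
      · rw [if_pos hc]
        refine ih m hi (by omega) (by omega) hmhi h50 (Or.inr ?_) hhi
        simp only [pvF]
        linarith
      · rw [if_neg hc]
        refine ih lo (m - 1) (by omega) h0 (by omega) (by omega) hlo ?_
        intro i hi1 hi2
        have hxm : x < 3000 * m + 225 * m * m := not_le.mp hc
        have hkey : 0 ≤ (i - m) * (225 * (i + m) + 3000) :=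
          mul_nonneg (by omega) (by nlinarith)
        simp only [pvF]
        nlinarith
    · rw [dif_neg hlt]
      exact pvBS_base x lo h0 (by omega) hlo (fun i h1 h2 => hhi i (by omega) h2)

theorem pvB_R (x : Int) : pvR x (getQuestXPLevel_alt x) := by
  unfold getQuestXPLevel_alt
  refine pvBS_inv x 50 0 50 (by norm_num) le_rfl (by norm_num) le_rfl (Or.inl rfl) ?_
  intro i h1 h2
  omega

-- ===== VERDICT (by name: the statement is the Claim_ definition above) =====
theorem getQuestXPLevel_spec : Claim_equal_getQuestXPLevel := by
  intro x _
  exact pvR_unique x _ _ (pvA_R x) (pvB_R x)
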